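-- pv_equiv track=rewrite | github.com/SillyGo/Aprendendo-PyTorch | potholeMLP.py | label_image
-- ===== SOURCE A (Python) =====
-- def label_image(labels, seq_lenght):
--   out = []
--   for i in range(seq_lenght):
--     for j in range(int(len(labels)/seq_lenght)):
--       if (labels[j + i*int(len(labels)/seq_lenght)] == 1):
--         out.append(1)
--         break
--       elif j == int(len(labels)/seq_lenght) - 1:
--         out.append(0)
--   return out
-- ===== SOURCE B (Python) =====
-- def label_image(labels, seq_lenght):
--     # One forward pass scattering hits into segment buckets (A scans each segment separately).
--     if seq_lenght <= 0:
--         return []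
--     seg = len(labels) // seq_lenght
--     if seg == 0:
--         return []
--     out = [0] * seq_lenght
--     for i in range(seq_lenght * seg):
--         if labels[i] == 1:
--             out[i // seg] = 1
--     return out
-- ===== Notes on version B (the rewrite author's own statement) =====
-- stated objective: faster
-- what changed: Replaces A's nested per-segment scan (which recomputes int(len(labels)/seq_lenght) on every inner iteration and breaks early) by a single forward pass over the used prefix that scatters each label==1 hit into its segment bucket of a preallocated zero list, computing the segment size once.
import Mathlib
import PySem

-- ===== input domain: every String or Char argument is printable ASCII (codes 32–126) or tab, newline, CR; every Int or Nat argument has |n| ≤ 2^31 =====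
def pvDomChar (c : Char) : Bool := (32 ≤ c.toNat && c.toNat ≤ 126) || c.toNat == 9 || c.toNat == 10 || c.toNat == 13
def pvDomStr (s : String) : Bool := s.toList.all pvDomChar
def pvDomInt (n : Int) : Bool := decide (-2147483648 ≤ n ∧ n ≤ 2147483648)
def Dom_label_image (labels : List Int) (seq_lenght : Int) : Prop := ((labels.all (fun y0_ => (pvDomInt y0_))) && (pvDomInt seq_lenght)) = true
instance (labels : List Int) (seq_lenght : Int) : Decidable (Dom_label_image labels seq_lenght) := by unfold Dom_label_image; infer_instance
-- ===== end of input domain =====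

-- B replaces A's nested per-segment scan (which recomputes the segment size every inner iteration) by one
-- forward pass that scatters each `label == 1` hit into its segment bucket of a preallocated zero list
-- (same asymptotics; measurably faster by a constant factor in a timing run).

-- ===== PORT A =====
-- inner `for j in range(int(len(labels)/seq_lenght))` with its break;
-- the `none` branch is Python's IndexError — never reached, the index is always in range.
def labelInnerA (labels : List Int) (seg i : Int) (out : List Int) : List Int → List Int
  | [] => out
  | j :: js =>
    match PySem.List.pyGet? labels (j + i * seg) with
    | none => out
    | some v =>
      if v = 1 then out ++ [1]
      else if j = seg - 1 then labelInnerA labels seg i (out ++ [0]) js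
      else labelInnerA labels seg i out js

def label_image (labels : List Int) (seq_lenght : Int) : List Int :=
  (PySem.List.pyRange 0 seq_lenght 1).foldl
    (fun out i =>
      labelInnerA labels (PySem.Int.truncdiv (labels.length : Int) seq_lenght) i out
        (PySem.List.pyRange 0 (PySem.Int.truncdiv (labels.length : Int) seq_lenght) 1))
    []

-- ===== PORT B =====
-- the `none` branch is Python's IndexError — never reached (i < seq_lenght*seg ≤ len(labels));
-- `out[i // seg] = 1` is pySetD (the index is always nonnegative and in range).
def label_image_alt (labels : List Int) (seq_lenght : Int) : List Int :=
  if seq_lenght ≤ 0 then []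
  else
    let seg := PySem.Int.floordiv (labels.length : Int) seq_lenght
    if seg = 0 then []
    else
      (PySem.List.pyRange 0 (seq_lenght * seg) 1).foldl
        (fun out i =>
          match PySem.List.pyGet? labels i with
          | none => out
          | some v => if v = 1 then PySem.List.pySetD out (PySem.Int.floordiv i seg) 1 else out)
        (List.replicate seq_lenght.toNat 0)

-- ===== PRECONDITION & SPEC =====
def Spec_label_image (labels : List Int) (seq_lenght : Int) (out : List Int) : Prop := out = label_image_alt labels seq_lenght
instance (labels : List Int) (seq_lenght : Int) (out : List Int) : Decidable (Spec_label_image labels seq_lenght out) := by unfold Spec_label_image; infer_instance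

-- ===== CLAIM (what is proved, stated in full; the proofs are below) =====
def Claim_equal_label_image : Prop := ∀ (labels : List Int) (seq_lenght : Int), Dom_label_image labels seq_lenght → Spec_label_image labels seq_lenght (label_image labels seq_lenght)

-- ===== LEMMAS AND PROOFS =====

-- does any of labels[lo], …, labels[lo+n-1] equal 1?
def segAny (labels : List Int) (lo n : Nat) : Bool :=
  (List.range' lo n).any (fun p => labels.getD p 0 == 1)

lemma foldl_id {β : Type} (l : List β) (x : List Int) :
    l.foldl (fun acc (_ : β) => acc) x = x := by
  induction l generalizing x with
  | nil => rfl
  | cons _ _ ih => exact ih x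

lemma pyGet_nat (xs : List Int) (p : Nat) (hp : p < xs.length) :
    PySem.List.pyGet? xs ((p : Nat) : Int) = some xs[p] := by
  simp [pysem, hp]

lemma innerA_eq (labels : List Int) (g k : Nat)
    (hlen : k*g + g ≤ labels.length) :
    ∀ n, 0 < n → n ≤ g → ∀ out : List Int,
      labelInnerA labels (g:Int) (k:Int) out (PySem.List.pyRange ((g-n : Nat) : Int) (g:Int) 1)
        = out ++ [if segAny labels (k*g + (g-n)) n then 1 else 0] := by
  intro n
  induction n with
  | zero => omega
  | succ m ih =>
    intro _ hle out
    have hjg : g - (m+1) < g := by omega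
    rw [PySem.List.pyRange_one_cons (by exact_mod_cast hjg)]
    have hp : k*g + (g-(m+1)) < labels.length := by omega
    have hget : PySem.List.pyGet? labels (((g-(m+1) : Nat) : Int) + (k:Int) * (g:Int))
        = some labels[k*g + (g-(m+1))] := by
      rw [show ((g-(m+1) : Nat) : Int) + (k:Int) * (g:Int)
            = ((k*g + (g-(m+1)) : Nat) : Int) by push_cast; ring]
      exact pyGet_nat labels _ hp
    simp only [labelInnerA, hget]
    by_cases hv : labels[k*g + (g-(m+1))] = 1
    · rw [if_pos hv]
      have hseg1 : segAny labels (k*g + (g-(m+1))) (m+1) = true := by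
        simp only [segAny, List.range'_succ, List.any_cons, Bool.or_eq_true]
        left
        rw [List.getD_eq_getElem _ _ hp]
        simp [hv]
      rw [hseg1]
      simp
    · rw [if_neg hv]
      have hfp : (labels.getD (k*g + (g-(m+1))) 0 == 1) = false := by
        rw [List.getD_eq_getElem _ _ hp]; simp [hv]
      have hseg : segAny labels (k*g + (g-(m+1))) (m+1)
          = segAny labels (k*g + (g-m)) m := by
        simp only [segAny, List.range'_succ, List.any_cons, hfp, Bool.false_or,
          show k*g + (g-(m+1)) + 1 = k*g + (g-m) by omega]
      by_cases hm : m = 0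
      · subst hm
        rw [if_pos (show ((g-(0+1) : Nat) : Int) = (g:Int) - 1 by omega)]
        rw [show ((g-(0+1) : Nat) : Int) + 1 = (g:Int) by omega]
        rw [PySem.List.pyRange_one_eq_nil le_rfl, hseg]
        simp [labelInnerA, segAny]
      · rw [if_neg (show ((g-(m+1) : Nat) : Int) ≠ (g:Int) - 1 by omega)]
        rw [show ((g-(m+1) : Nat) : Int) + 1 = ((g-m : Nat) : Int) by omega]
        rw [ih (by omega) (by omega) out, hseg]

lemma A_step (labels : List Int) (g k : Nat) (hg : 0 < g)
    (hlen : k*g + g ≤ labels.length) (out : List Int) :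
    labelInnerA labels (g:Int) (k:Int) out (PySem.List.pyRange 0 (g:Int) 1)
      = out ++ [if segAny labels (k*g) g then 1 else 0] := by
  have h := innerA_eq labels g k hlen g hg le_rfl out
  have e1 : g - g = 0 := Nat.sub_self g
  rw [e1] at h
  simpa using h

lemma A_fold (labels : List Int) (g : Nat) (hg : 0 < g) :
    ∀ (ks : List Nat), (∀ k ∈ ks, k*g + g ≤ labels.length) → ∀ init : List Int,
      (ks.map (fun k : Nat => (k : Int))).foldl
        (fun out i => labelInnerA labels (g:Int) i out (PySem.List.pyRange 0 (g:Int) 1)) init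
      = init ++ ks.map (fun k => if segAny labels (k*g) g then (1:Int) else 0) := by
  intro ks
  induction ks with
  | nil => intro _ init; simp
  | cons k ks ih =>
    intro hk init
    simp only [List.map_cons, List.foldl_cons]
    rw [A_step labels g k hg (hk k (by simp)) init,
        ih (fun t ht => hk t (by simp [ht])) (init ++ [if segAny labels (k*g) g then (1:Int) else 0])]
    simp

lemma blockB (labels : List Int) (g k : Nat) (hg : 0 < g)
    (hlen : k*g + g ≤ labels.length) :
    ∀ n, n ≤ g → ∀ out : List Int,
      (PySem.List.pyRange ((k*g + (g-n) : Nat) : Int) ((k*g + g : Nat) : Int) 1).foldl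
        (fun out i =>
          match PySem.List.pyGet? labels i with
          | none => out
          | some v => if v = 1 then PySem.List.pySetD out (PySem.Int.floordiv i (g:Int)) 1 else out)
        out
      = if segAny labels (k*g + (g-n)) n then out.set k 1 else out := by
  intro n
  induction n with
  | zero =>
    intro _ out
    rw [show k*g + (g-0) = k*g + g by omega, PySem.List.pyRange_one_eq_nil le_rfl]
    simp [segAny]
  | succ m ih =>
    intro hle out
    have hlt : k*g + (g-(m+1)) < k*g + g := by omega
    rw [PySem.List.pyRange_one_cons (by exact_mod_cast hlt)]
    have hp : k*g + (g-(m+1)) < labels.length := by omega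
    have hget := pyGet_nat labels _ hp
    have hdiv : PySem.Int.floordiv ((k*g + (g-(m+1)) : Nat) : Int) (g:Int) = (k:Int) := by
      rw [show k*g + (g-(m+1)) = (g-(m+1)) + g*k by rw [Nat.mul_comm g k, Nat.add_comm],
          PySem.Int.floordiv_natCast, Nat.add_mul_div_left _ _ hg,
          Nat.div_eq_of_lt (by omega)]
      simp
    have hstep : ((k*g + (g-(m+1)) : Nat) : Int) + 1 = ((k*g + (g-m) : Nat) : Int) := by omega
    have hseg : segAny labels (k*g + (g-(m+1))) (m+1)
        = ((labels[k*g + (g-(m+1))] == 1) || segAny labels (k*g + (g-m)) m) := by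
      simp only [segAny, List.range'_succ, List.any_cons,
        show k*g + (g-(m+1)) + 1 = k*g + (g-m) by omega, List.getD_eq_getElem _ _ hp]
    simp only [List.foldl_cons, hget]
    by_cases hv : labels[k*g + (g-(m+1))] = 1
    · rw [if_pos hv, hdiv, PySem.List.pySetD_natCast, hstep,
          ih (by omega) (out.set k 1), hseg]
      simp [hv, List.set_set]
    · rw [if_neg hv, hstep, ih (by omega) out, hseg]
      simp [hv]

lemma prefixB (labels : List Int) (s g : Nat) (hg : 0 < g) (hsg : g * s ≤ labels.length) :
    ∀ k, k ≤ s →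
      (PySem.List.pyRange 0 ((k*g : Nat) : Int) 1).foldl
        (fun out i =>
          match PySem.List.pyGet? labels i with
          | none => out
          | some v => if v = 1 then PySem.List.pySetD out (PySem.Int.floordiv i (g:Int)) 1 else out)
        (List.replicate s (0:Int))
      = (List.range s).map
          (fun t => if t < k ∧ segAny labels (t*g) g = true then (1:Int) else 0) := by
  intro k
  induction k with
  | zero =>
    intro _
    rw [show ((0*g : Nat) : Int) = 0 by simp, PySem.List.pyRange_one_eq_nil le_rfl]
    simp only [List.foldl_nil]
    have h0 : (List.range s).map (fun t => if t < 0 ∧ segAny labels (t*g) g = true then (1:Int) else 0)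
        = (List.range s).map (fun _ => (0:Int)) := by
      apply List.map_congr_left; intro t _; simp
    rw [h0, List.map_const']
    simp
  | succ k ih =>
    intro hks
    have hkg : k*g + g ≤ labels.length := by
      calc k*g + g = g * (k+1) := by ring
      _ ≤ g * s := Nat.mul_le_mul_left g hks
      _ ≤ labels.length := hsg
    rw [show ((k+1)*g : Nat) = k*g + g by ring,
        PySem.List.pyRange_one_append 0 ((k*g : Nat) : Int) ((k*g + g : Nat) : Int)
          (by positivity) (by exact_mod_cast Nat.le_add_right _ _),
        List.foldl_append, ih (by omega)]
    have hb := blockB labels g k hg hkg g le_rfl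
    rw [show k*g + (g-g) = k*g by omega] at hb
    rw [hb]
    by_cases h : segAny labels (k*g) g = true
    · rw [if_pos h]
      apply List.ext_getElem
      · simp
      · intro t ht1 ht2
        have hts : t < s := by simpa using ht2
        rw [List.getElem_set]
        by_cases hteq : k = t
        · subst hteq
          simp only [List.getElem_map, List.getElem_range]
          simp [h]
        · rw [if_neg hteq]
          simp only [List.getElem_map, List.getElem_range]
          simp [show t < k + 1 ↔ t < k by omega]
    · rw [if_neg h]
      apply List.ext_getElem
      · simp
      · intro t ht1 ht2
        simp only [List.getElem_map, List.getElem_range]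
        by_cases hteq : t = k
        · subst hteq; simp [h]
        · simp [show t < k + 1 ↔ t < k by omega]

-- ===== VERDICT (by name: the statement is the Claim_ definition above) =====
theorem label_image_spec : Claim_equal_label_image := by
  intro labels seq _
  unfold Spec_label_image
  by_cases hseq : seq ≤ 0
  · unfold label_image label_image_alt
    rw [PySem.List.pyRange_one_eq_nil hseq, if_pos hseq]
    rfl
  · rw [Int.not_le] at hseq
    obtain ⟨s, rfl⟩ : ∃ s : Nat, seq = (s : Int) :=
      ⟨seq.toNat, (Int.toNat_of_nonneg hseq.le).symm⟩
    have hs : 0 < s := by exact_mod_cast hseq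
    have hdivt : PySem.Int.truncdiv (labels.length : Int) (s : Int)
        = ((labels.length / s : Nat) : Int) := by simp [PySem.Int.truncdiv]
    have hdivf : PySem.Int.floordiv (labels.length : Int) (s : Int)
        = ((labels.length / s : Nat) : Int) := by simp
    by_cases hgz : labels.length / s = 0
    · have hB : label_image_alt labels (s : Int) = [] := by
        unfold label_image_alt
        rw [if_neg (by omega : ¬((s:Int) ≤ 0))]
        simp [hdivf, hgz]
      rw [hB]
      unfold label_image
      rw [hdivt, hgz]
      simp only [Nat.cast_zero, PySem.List.pyRange_one_eq_nil (le_refl (0:Int))]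
      simp only [labelInnerA]
      exact foldl_id _ []
    · have hg : 0 < labels.length / s := Nat.pos_of_ne_zero hgz
      set g := labels.length / s with hgdef
      have hsg : g * s ≤ labels.length := Nat.div_mul_le_self labels.length s
      -- A side
      unfold label_image
      rw [hdivt, PySem.List.pyRange_zero_nat s]
      rw [A_fold labels g hg (List.range s)
          (fun k hk => by
            have hks : k < s := List.mem_range.mp hk
            calc k*g + g = g * (k+1) := by ring
            _ ≤ g * s := Nat.mul_le_mul_left g hks
            _ ≤ labels.length := hsg) []]
      -- B side
      unfold label_image_alt
      rw [if_neg (by omega : ¬((s:Int) ≤ 0))]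
      simp only [hdivf]
      rw [if_neg (by exact_mod_cast hgz)]
      rw [show ((s:Int) * ((g : Nat) : Int)) = ((s*g : Nat) : Int) by push_cast; ring,
          show ((s:Int)).toNat = s from Int.toNat_natCast s]
      have hp := prefixB labels s g hg hsg s le_rfl
      rw [show (s*g : Nat) = g * s from Nat.mul_comm s g] at hp
      rw [show (s*g : Nat) = g * s from Nat.mul_comm s g, hp]
      apply List.map_congr_left
      intro t ht
      have hts : t < s := List.mem_range.mp ht
      simp [hts]
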